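-- pv_equiv track=rewrite | github.com/jihyun-0611/level2-semanticsegmentation | eda_and_visualization/confusion_matrix.py | align_names
-- ===== SOURCE A (Python) =====
-- def align_names(gt_paths, image_names):
--     # gt_paths에서 이미지 ID 추출
--     gt_image_ids = [path.split("/")[1][:-5] for path in gt_paths]  # image1666141916583
--     # image_names에서 이미지 ID 추출
--     image_ids = [name.split(".")[0] for name in image_names]  # image1666141916583
--
--     # 매칭을 위한 딕셔너리 생성
--     gt_dict = {img_id: path for img_id, path in zip(gt_image_ids, gt_paths)}
--     image_dict = {img_id: name for img_id, name in zip(image_ids, image_names)}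
--
--     # 공통된 이미지 ID 찾기
--     common_ids = sorted(set(gt_image_ids) & set(image_ids))
--
--     # 공통 ID를 기준으로 정렬된 리스트 생성
--     sorted_gt_paths = [gt_dict[img_id] for img_id in common_ids]
--     sorted_image_names = [image_dict[img_id] for img_id in common_ids]
--
--     return sorted_gt_paths, sorted_image_names
-- ===== SOURCE B (Python) =====
-- def align_names(gt_paths, image_names):
--     # Deduplicate by id with a dict comprehension, sort the (id, value) items,
--     # then emit matching ids with a two-pointer merge over the sorted lists.
--     gt_pairs = sorted({p.split("/")[1][:-5]: p for p in gt_paths}.items())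
--     img_pairs = sorted({n.split(".")[0]: n for n in image_names}.items())
--     out_gt, out_img = [], []
--     i = j = 0
--     while i < len(gt_pairs) and j < len(img_pairs):
--         gid, gpath = gt_pairs[i]
--         iid, iname = img_pairs[j]
--         if gid < iid:
--             i += 1
--         elif iid < gid:
--             j += 1
--         else:
--             out_gt.append(gpath)
--             out_img.append(iname)
--             i += 1
--             j += 1
--     return out_gt, out_img
-- ===== Notes on version B (the rewrite author's own statement) =====
-- stated objective: alternative
-- what changed: Replaces A's two id lists plus sorted set-intersection plus per-id dict lookups by deduplicating into dict items, sorting the two (id, value) pair lists, and emitting the matches with a single two-pointer merge; Pre_ excludes gt paths without a '/', on which A raises IndexError.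
import Mathlib
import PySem

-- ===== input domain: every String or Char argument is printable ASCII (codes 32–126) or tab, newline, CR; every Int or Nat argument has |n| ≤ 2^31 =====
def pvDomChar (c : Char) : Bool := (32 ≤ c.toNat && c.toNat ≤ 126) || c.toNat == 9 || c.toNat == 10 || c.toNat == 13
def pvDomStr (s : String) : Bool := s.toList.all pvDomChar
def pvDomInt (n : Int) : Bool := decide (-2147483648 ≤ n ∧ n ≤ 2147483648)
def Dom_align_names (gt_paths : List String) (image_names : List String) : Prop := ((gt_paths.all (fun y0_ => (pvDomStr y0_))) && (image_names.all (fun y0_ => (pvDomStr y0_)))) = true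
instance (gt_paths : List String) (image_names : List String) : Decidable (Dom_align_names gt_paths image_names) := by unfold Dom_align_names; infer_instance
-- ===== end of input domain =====

-- B deduplicates by id into dict items, sorts the two (id, value) pair lists and emits the
-- matching ids with a two-pointer merge (alternative decomposition, not claimed faster).

-- ===== PORT A =====
-- path.split("/")[1][:-5]; split? "/" is exact (sep ≠ ""), [1] via pyGetD (in range under Pre_)
def gtId (path : String) : String :=
  String.ofList (PySem.List.slice (PySem.List.pyGetD ((PySem.Str.split? path "/").getD []) 1 "").toList none (some (-5)))

-- name.split(".")[0]; a split list is never empty, so index 0 never raises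
def imgId (name : String) : String :=
  PySem.List.pyGetD ((PySem.Str.split? name ".").getD []) 0 ""

def align_names (gt_paths : List String) (image_names : List String) : List String × List String :=
  let gt_image_ids := gt_paths.map (fun path => gtId path)
  let image_ids := image_names.map (fun name => imgId name)
  let gt_dict := (gt_image_ids.zip gt_paths).foldl (fun d p => d.insert p.1 p.2) PySem.Dict.empty
  let image_dict := (image_ids.zip image_names).foldl (fun d p => d.insert p.1 p.2) PySem.Dict.empty
  let common_ids := PySem.List.sorted (PySem.Set.inter (PySem.Set.ofList gt_image_ids) (PySem.Set.ofList image_ids)) (fun x => x) false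
  -- gt_dict[img_id] / image_dict[img_id]: the key is always present (common ids), getD "" is exact there
  (common_ids.map (fun k => gt_dict.getD k ""), common_ids.map (fun k => image_dict.getD k ""))

-- ===== PORT B =====
-- the two-pointer while loop of Source B; recursion on the two sorted pair lists
def mergeAligned : List (String × String) → List (String × String) → List String × List String
  | [], _ => ([], [])
  | _ :: _, [] => ([], [])
  | g :: gs, h :: hs =>
    if g.1 < h.1 then mergeAligned gs (h :: hs)
    else if h.1 < g.1 then mergeAligned (g :: gs) hs
    else
      let r := mergeAligned gs hs
      (g.2 :: r.1, h.2 :: r.2)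
  termination_by gp ip => gp.length + ip.length
  decreasing_by all_goals (simp only [List.length_cons]; omega)

def align_names_alt (gt_paths : List String) (image_names : List String) : List String × List String :=
  let gt_pairs := PySem.List.sorted
    ((gt_paths.foldl (fun d p => d.insert (gtId p) p) PySem.Dict.empty).items) (fun t => t.1) false
  let img_pairs := PySem.List.sorted
    ((image_names.foldl (fun d n => d.insert (imgId n) n) PySem.Dict.empty).items) (fun t => t.1) false
  mergeAligned gt_pairs img_pairs

-- ===== PRECONDITION & SPEC =====
-- Pre_ excludes exactly the inputs where Python A raises: a gt path without '/'
-- makes path.split("/")[1] an IndexError.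
def Pre_align_names (gt_paths : List String) (image_names : List String) : Prop :=
  ∀ p ∈ gt_paths, '/' ∈ p.toList
instance (gt_paths : List String) (image_names : List String) : Decidable (Pre_align_names gt_paths image_names) := by unfold Pre_align_names; infer_instance

def pvWitness_align_names : List String × List String :=
  (["train/image123.json", "train/image045.json"], ["image045.png", "image123.png", "other.png"])

def Spec_align_names (gt_paths : List String) (image_names : List String) (out : List String × List String) : Prop := out = align_names_alt gt_paths image_names
instance (gt_paths : List String) (image_names : List String) (out : List String × List String) : Decidable (Spec_align_names gt_paths image_names out) := by unfold Spec_align_names; infer_instance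

-- ===== CLAIM (what is proved, stated in full; the proofs are below) =====
def Claim_equal_align_names : Prop := ∀ (gt_paths : List String) (image_names : List String), Dom_align_names gt_paths image_names → Pre_align_names gt_paths image_names → Spec_align_names gt_paths image_names (align_names gt_paths image_names)

-- ===== LEMMAS AND PROOFS =====

-- last value with the given key (dict last-wins), as a structural recursion
def lastV : List (String × String) → String → Option String
  | [], _ => none
  | p :: l, k => match lastV l k with
    | some v => some v
    | none => if p.1 = k then some p.2 else none

-- the sorted common-key list both programs produce
def cKeys (Kg Ki : List String) : List String :=
  PySem.List.sorted (PySem.Set.inter (PySem.Set.ofList Kg) (PySem.Set.ofList Ki)) (fun x => x) false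

theorem lastV_eq_none_iff (l : List (String × String)) (k : String) :
    lastV l k = none ↔ k ∉ l.map Prod.fst := by
  induction l with
  | nil => simp [lastV]
  | cons p l ih =>
    simp only [lastV, List.map_cons, List.mem_cons]
    cases h : lastV l k with
    | some v =>
      have hk : k ∈ l.map Prod.fst := by
        by_contra hk
        exact absurd (ih.mpr hk) (by rw [h]; simp)
      simp [hk]
    | none =>
      have hk := ih.mp h
      by_cases hp : p.1 = k
      · simp [hp, hk]
      · simp [Ne.symm hp, hp, hk]

theorem lastV_cons_of_ne (p : String × String) (l : List (String × String)) (k : String)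
    (h : p.1 ≠ k) : lastV (p :: l) k = lastV l k := by
  simp only [lastV]
  cases lastV l k with
  | some v => rfl
  | none => simp [h]

theorem lastV_map_keys (keys : List String) (f : String → String) (hnd : keys.Nodup)
    (k : String) (hk : k ∈ keys) :
    lastV (keys.map (fun k' => (k', f k'))) k = some (f k) := by
  induction keys with
  | nil => simp at hk
  | cons a t ih =>
    rw [List.nodup_cons] at hnd
    rcases List.mem_cons.mp hk with rfl | hkt
    · have hn : lastV (t.map (fun k' => (k', f k'))) k = none := by
        rw [lastV_eq_none_iff]
        simp only [List.map_map]
        intro hc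
        rcases List.mem_map.mp hc with ⟨x, hx, hxe⟩
        exact hnd.1 (show k ∈ t from by simpa [← hxe] using hx)
      simp [lastV, hn]
    · rw [List.map_cons, lastV_cons_of_ne _ _ _ (by
        intro he
        exact hnd.1 (show a ∈ t from by rw [show a = k from he]; exact hkt)), ih hnd.2 hkt]

theorem pairwise_keys_lb (g : String × String) (gs : List (String × String))
    (hg : (g :: gs).Pairwise (fun a b => a.1 < b.1)) :
    ∀ k ∈ (g :: gs).map Prod.fst, g.1 ≤ k := by
  intro k hk
  rcases List.mem_map.mp hk with ⟨a, ha, rfl⟩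
  rcases List.mem_cons.mp ha with rfl | ha
  · exact le_refl _
  · exact le_of_lt ((List.pairwise_cons.mp hg).1 a ha)

theorem mem_map_fst_cons (p : String × String) (l : List (String × String)) (k : String) :
    k ∈ (p :: l).map Prod.fst ↔ k = p.1 ∨ k ∈ l.map Prod.fst := by
  rw [List.map_cons, List.mem_cons]

theorem not_mem_keys_of_strict (g : String × String) (gs : List (String × String))
    (hg : (g :: gs).Pairwise (fun a b => a.1 < b.1)) :
    g.1 ∉ gs.map Prod.fst := by
  intro hk
  rcases List.mem_map.mp hk with ⟨a, ha, hak⟩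
  have := (List.pairwise_cons.mp hg).1 a ha
  rw [hak] at this
  exact lt_irrefl _ this

theorem cKeys_pairwise (Kg Ki : List String) : (cKeys Kg Ki).Pairwise (· < ·) := by
  have hle := PySem.List.sorted_pairwise (PySem.Set.inter (PySem.Set.ofList Kg) (PySem.Set.ofList Ki)) (fun x => x)
  have hnd : (cKeys Kg Ki).Nodup :=
    (PySem.List.sorted_perm _ _ _).nodup_iff.mpr
      (PySem.Set.nodup_inter _ _ (PySem.Set.nodup_ofList Kg))
  exact (hle.and hnd).imp (fun h => lt_of_le_of_ne h.1 h.2)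

theorem mem_cKeys (Kg Ki : List String) (k : String) : k ∈ cKeys Kg Ki ↔ k ∈ Kg ∧ k ∈ Ki := by
  rw [cKeys, PySem.List.mem_sorted, PySem.Set.mem_inter, PySem.Set.mem_ofList, PySem.Set.mem_ofList]

theorem cKeys_eq_of_strict (Kg Ki : List String) (S : List String)
    (hS : S.Pairwise (· < ·)) (hmem : ∀ k, k ∈ S ↔ k ∈ Kg ∧ k ∈ Ki) : cKeys Kg Ki = S := by
  apply PySem.List.sorted_eq_of_perm_of_pairwise_lt
  · rw [List.perm_ext_iff_of_nodup (List.Pairwise.imp ne_of_lt hS)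
        (PySem.Set.nodup_inter _ _ (PySem.Set.nodup_ofList Kg))]
    intro a
    rw [hmem a, PySem.Set.mem_inter, PySem.Set.mem_ofList, PySem.Set.mem_ofList]
  · exact hS

theorem cKeys_congr (Kg Ki Kg' Ki' : List String)
    (hg : ∀ k, k ∈ Kg ↔ k ∈ Kg') (hi : ∀ k, k ∈ Ki ↔ k ∈ Ki') : cKeys Kg Ki = cKeys Kg' Ki' := by
  apply cKeys_eq_of_strict _ _ _ (cKeys_pairwise Kg' Ki')
  intro k
  rw [mem_cKeys, hg, hi]

theorem merge_spec (gp ip : List (String × String))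
    (hg : gp.Pairwise (fun a b => a.1 < b.1)) (hi : ip.Pairwise (fun a b => a.1 < b.1)) :
    mergeAligned gp ip =
      ((cKeys (gp.map Prod.fst) (ip.map Prod.fst)).map (fun k => (lastV gp k).getD ""),
       (cKeys (gp.map Prod.fst) (ip.map Prod.fst)).map (fun k => (lastV ip k).getD "")) := by
  revert hg hi
  induction gp, ip using mergeAligned.induct with
  | case1 ip =>
    intro _ _
    rw [mergeAligned, cKeys_eq_of_strict _ _ [] (by simp) (by simp)]
    simp
  | case2 g gs =>
    intro _ _
    rw [mergeAligned, cKeys_eq_of_strict _ _ [] (by simp) (by simp)]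
    simp
  | case3 g gs h hs h1 ih =>
    -- g.1 < h.1 : drop g; g.1 is below every image key
    intro hg hi
    have hgs := List.Pairwise.of_cons hg
    have hiLB := pairwise_keys_lb h hs hi
    have cEq : cKeys ((g :: gs).map Prod.fst) ((h :: hs).map Prod.fst)
        = cKeys (gs.map Prod.fst) ((h :: hs).map Prod.fst) := by
      apply cKeys_eq_of_strict _ _ _ (cKeys_pairwise _ _)
      intro k
      rw [mem_cKeys, mem_map_fst_cons g gs]
      constructor
      · rintro ⟨hk1, hk2⟩
        exact ⟨Or.inr hk1, hk2⟩
      · rintro ⟨hk1, hk2⟩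
        rcases hk1 with rfl | hk1'
        · exact absurd (lt_of_lt_of_le h1 (hiLB _ hk2)) (lt_irrefl _)
        · exact ⟨hk1', hk2⟩
    rw [mergeAligned.eq_def]
    simp only [h1, if_true]
    rw [ih hgs hi, cEq]
    refine Prod.ext ?_ rfl
    apply List.map_congr_left
    intro k hk
    have hk2 := ((mem_cKeys _ _ k).mp hk).2
    have : g.1 ≠ k := ne_of_lt (lt_of_lt_of_le h1 (hiLB _ hk2))
    rw [lastV_cons_of_ne _ _ _ this]
  | case4 g gs h hs h1 h2 ih =>
    -- h.1 < g.1 : drop h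
    intro hg hi
    have hhs := List.Pairwise.of_cons hi
    have hgLB := pairwise_keys_lb g gs hg
    have cEq : cKeys ((g :: gs).map Prod.fst) ((h :: hs).map Prod.fst)
        = cKeys ((g :: gs).map Prod.fst) (hs.map Prod.fst) := by
      apply cKeys_eq_of_strict _ _ _ (cKeys_pairwise _ _)
      intro k
      rw [mem_cKeys, mem_map_fst_cons h hs]
      constructor
      · rintro ⟨hk1, hk2⟩
        exact ⟨hk1, Or.inr hk2⟩
      · rintro ⟨hk1, hk2⟩
        rcases hk2 with rfl | hk2'
        · exact absurd (lt_of_lt_of_le h2 (hgLB _ hk1)) (lt_irrefl _)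
        · exact ⟨hk1, hk2'⟩
    rw [mergeAligned.eq_def]
    simp only [h1, h2, if_true, if_false]
    rw [ih hg hhs, cEq]
    refine Prod.ext rfl ?_
    apply List.map_congr_left
    intro k hk
    have hk1 := ((mem_cKeys _ _ k).mp hk).1
    have : h.1 ≠ k := ne_of_lt (lt_of_lt_of_le h2 (hgLB _ hk1))
    rw [lastV_cons_of_ne _ _ _ this]
  | case5 g gs h hs h1 h2 ih =>
    -- emit: equal keys; strict ordering makes each head the only pair with its key
    intro hg hi
    have hgs := List.Pairwise.of_cons hg
    have hhs := List.Pairwise.of_cons hi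
    have heq : g.1 = h.1 := le_antisymm (le_of_not_gt h2) (le_of_not_gt h1)
    have hgnm : g.1 ∉ gs.map Prod.fst := not_mem_keys_of_strict g gs hg
    have hhnm : h.1 ∉ hs.map Prod.fst := not_mem_keys_of_strict h hs hi
    have hgLB := pairwise_keys_lb g gs hg
    have cEq : cKeys ((g :: gs).map Prod.fst) ((h :: hs).map Prod.fst)
        = g.1 :: cKeys (gs.map Prod.fst) (hs.map Prod.fst) := by
      apply cKeys_eq_of_strict
      · refine List.pairwise_cons.mpr ⟨?_, cKeys_pairwise _ _⟩
        intro k hk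
        have hk1 := ((mem_cKeys _ _ k).mp hk).1
        have hle : g.1 ≤ k := hgLB k (by rw [mem_map_fst_cons]; exact Or.inr hk1)
        exact lt_of_le_of_ne hle (fun he => hgnm (he ▸ hk1))
      · intro k
        rw [List.mem_cons, mem_cKeys, mem_map_fst_cons g gs, mem_map_fst_cons h hs]
        constructor
        · rintro (rfl | ⟨hk1, hk2⟩)
          · exact ⟨Or.inl rfl, Or.inl heq⟩
          · exact ⟨Or.inr hk1, Or.inr hk2⟩
        · rintro ⟨hk1, hk2⟩
          by_cases hgk : k = g.1
          · exact Or.inl hgk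
          · refine Or.inr ⟨?_, ?_⟩
            · rcases hk1 with rfl | h'
              · exact absurd rfl hgk
              · exact h'
            · rcases hk2 with rfl | h'
              · exact absurd heq.symm hgk
              · exact h'
    have hg1 : lastV (g :: gs) g.1 = some g.2 := by
      have hn : lastV gs g.1 = none := (lastV_eq_none_iff gs g.1).mpr hgnm
      simp [lastV, hn]
    have hh1 : lastV (h :: hs) g.1 = some h.2 := by
      rw [heq]
      have hn : lastV hs h.1 = none := (lastV_eq_none_iff hs h.1).mpr hhnm
      simp [lastV, hn]
    rw [mergeAligned.eq_def]
    simp only [h1, h2, if_false]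
    rw [ih hgs hhs, cEq]
    simp only [List.map_cons, hg1, hh1, Option.getD_some]
    refine Prod.ext ?_ ?_ <;> simp only [] <;> refine congrArg₂ List.cons rfl ?_ <;>
      apply List.map_congr_left <;> intro k hk
    · have hk1 := ((mem_cKeys _ _ k).mp hk).1
      have : g.1 ≠ k := fun he => hgnm (he ▸ hk1)
      rw [lastV_cons_of_ne _ _ _ this]
    · have hk2 := ((mem_cKeys _ _ k).mp hk).2
      have : h.1 ≠ k := fun he => hhnm (he ▸ hk2)
      rw [lastV_cons_of_ne _ _ _ this]

theorem zip_map_self {α β : Type} (f : α → β) (l : List α) :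
    (l.map f).zip l = l.map (fun x => (f x, x)) := by
  induction l with
  | nil => rfl
  | cons a t ih => simp [ih]

-- the dedupe-sort side of B, characterised: sorted items of the last-wins dict by id
theorem sortedItems_side (vals : List String) (key : String → String)
    (D : PySem.Dict String String)
    (hD : D = vals.foldl (fun d v => d.insert (key v) v) PySem.Dict.empty)
    (SP : List (String × String))
    (hSP : SP = PySem.List.sorted D.items (fun t => t.1) false) :
    SP.Pairwise (fun a b => a.1 < b.1)
    ∧ (∀ k, k ∈ SP.map Prod.fst ↔ k ∈ vals.map key)
    ∧ (∀ k, k ∈ SP.map Prod.fst → (lastV SP k).getD "" = D.getD k "") := by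
  have hnd : D.keys.Nodup := by
    rw [hD]
    exact PySem.Dict.nodup_keys_foldl_insert_key vals key (fun _ v => v) PySem.Dict.empty
      PySem.Dict.nodup_keys_empty
  have hperm : (SP.map Prod.fst).Perm D.keys := by
    rw [hSP]
    exact (PySem.List.sorted_perm D.items (fun t => t.1) false).map Prod.fst
  have hndSP : (SP.map Prod.fst).Nodup := hperm.nodup_iff.mpr hnd
  have hstrict : SP.Pairwise (fun a b => a.1 < b.1) := by
    have hle : SP.Pairwise (fun a b => a.1 ≤ b.1) := by
      rw [hSP]; exact PySem.List.sorted_pairwise D.items (fun t => t.1)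
    have hne : SP.Pairwise (fun a b => a.1 ≠ b.1) := List.pairwise_map.mp hndSP
    exact (hle.and hne).imp (fun h => lt_of_le_of_ne h.1 h.2)
  have hmemKeys : ∀ k, k ∈ SP.map Prod.fst ↔ k ∈ vals.map key := by
    intro k
    rw [hperm.mem_iff, hD, PySem.Dict.keys_foldl_insert_key]
    rw [PySem.Dict.keys_empty, PySem.Set.mem_update]
    simp
  refine ⟨hstrict, hmemKeys, ?_⟩
  intro k hk
  have hsub : ∀ p ∈ SP, p ∈ D.items := by
    intro p hp
    rw [hSP] at hp
    exact (PySem.List.mem_sorted _ _ _ _).mp hp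
  -- keys are distinct, so SP itself is a map over its own key list
  have hSPmap : SP = (SP.map Prod.fst).map (fun k' => (k', D.getD k' "")) := by
    rw [List.map_map]
    apply List.ext_getElem (by simp)
    intro i h1 h2
    simp only [List.getElem_map, Function.comp_apply]
    have hmi : (SP[i].1, SP[i].2) ∈ D.items := by
      simpa using hsub SP[i] (List.getElem_mem h1)
    have := PySem.Dict.getD_of_mem_items D hmi hnd ""
    exact Prod.ext rfl this.symm
  conv_lhs => rw [hSPmap]
  rw [lastV_map_keys _ _ hndSP k hk]
  rfl

-- ===== VERDICT (by name: the statement is the Claim_ definition above) =====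
theorem align_names_spec : Claim_equal_align_names := by
  intro gt_paths image_names _ _
  unfold Spec_align_names align_names align_names_alt
  simp only []
  rw [zip_map_self (fun p => gtId p) gt_paths, zip_map_self (fun n => imgId n) image_names,
      List.foldl_map, List.foldl_map]
  obtain ⟨hgS, hgM, hgL⟩ := sortedItems_side gt_paths gtId _ rfl _ rfl
  obtain ⟨hiS, hiM, hiL⟩ := sortedItems_side image_names imgId _ rfl _ rfl
  rw [merge_spec _ _ hgS hiS]
  have hck : cKeys
        ((PySem.List.sorted (gt_paths.foldl (fun d p => d.insert (gtId p) p) PySem.Dict.empty).items (fun t => t.1) false).map Prod.fst)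
        ((PySem.List.sorted (image_names.foldl (fun d n => d.insert (imgId n) n) PySem.Dict.empty).items (fun t => t.1) false).map Prod.fst)
      = cKeys (gt_paths.map (fun p => gtId p)) (image_names.map (fun n => imgId n)) := by
    apply cKeys_congr <;> intro k
    · exact hgM k
    · exact hiM k
  rw [hck]
  refine Prod.ext ?_ ?_ <;> simp only [] <;> apply List.map_congr_left <;> intro k hk
  · rw [hgL k (by rw [hgM]; exact ((mem_cKeys _ _ k).mp hk).1)]
  · rw [hiL k (by rw [hiM]; exact ((mem_cKeys _ _ k).mp hk).2)]
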